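-- pv_equiv track=rewrite | github.com/okainov/advent-of-code-2021 | python/day_4.py | mark_number_in_board
-- ===== SOURCE A (Python) =====
-- def mark_number_in_board(board, number):
--     sum_unmarked = 0
--     marked = False
--     for i in board:
--         for j in board[i]:
--             current_number = list(board[i][j].keys())[0]
--             if number == current_number:
--                 board[i][j][number] = True
--                 marked = True
--             if not board[i][j][current_number]:
--                 sum_unmarked += int(current_number)
--     return marked, sum_unmarked
-- ===== SOURCE B (Python) =====
-- def mark_number_in_board(board, number):
--     # Divide-and-conquer over the flattened cell list instead of a fused nested loop;
--     # performs the same in-place marking mutation as A.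
--     cells = [c for row in board.values() for c in row.values()]
--     if not cells:
--         return False, 0
--
--     def go(lo, hi):
--         if hi - lo <= 1:
--             cell = cells[lo]
--             k = next(iter(cell))
--             if k == number:
--                 cell[k] = True
--                 return True, 0
--             return False, 0 if cell[k] else int(k)
--         mid = (lo + hi) // 2
--         m1, s1 = go(lo, mid)
--         m2, s2 = go(mid, hi)
--         return m1 or m2, s1 + s2
--
--     return go(0, len(cells))
-- ===== Notes on version B (the rewrite author's own statement) =====
-- stated objective: alternative
-- what changed: A's fused nested dict loop is replaced by a divide-and-conquer recursion over the flattened cell list: a leaf marks/scores one cell, and results combine by (or, +); depth is O(log n) instead of a linear accumulator pass.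
import Mathlib
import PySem

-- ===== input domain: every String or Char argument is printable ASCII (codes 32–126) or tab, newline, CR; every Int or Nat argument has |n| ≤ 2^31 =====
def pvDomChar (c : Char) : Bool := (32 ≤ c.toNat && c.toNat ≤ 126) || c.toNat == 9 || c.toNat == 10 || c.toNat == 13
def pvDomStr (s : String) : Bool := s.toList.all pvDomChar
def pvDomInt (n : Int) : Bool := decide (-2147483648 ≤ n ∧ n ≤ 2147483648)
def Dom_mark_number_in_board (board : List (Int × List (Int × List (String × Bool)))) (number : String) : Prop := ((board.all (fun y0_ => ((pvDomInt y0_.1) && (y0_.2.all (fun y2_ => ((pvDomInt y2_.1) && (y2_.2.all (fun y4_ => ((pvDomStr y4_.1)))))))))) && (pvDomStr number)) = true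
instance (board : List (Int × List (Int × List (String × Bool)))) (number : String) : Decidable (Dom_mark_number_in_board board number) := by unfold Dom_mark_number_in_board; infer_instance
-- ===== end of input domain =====

-- B replaces A's fused nested dict loop by a divide-and-conquer recursion over the
-- flattened cell list (leaf marks/scores one cell, results combine by (or, +)); B
-- performs the same in-place marking mutation as A (equivalence proved on the return value).

-- shared input decoding: the Python argument is a dict of dicts of dicts
def pvNest (board : List (Int × List (Int × List (String × Bool)))) : PySem.Dict Int (PySem.Dict Int (PySem.Dict String Bool)) :=
  PySem.Dict.ofList (board.map (fun p => (p.1, PySem.Dict.ofList (p.2.map (fun q => (q.1, PySem.Dict.ofList q.2))))))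

-- ===== PORT A =====
def mark_number_in_board (board : List (Int × List (Int × List (String × Bool)))) (number : String) : Bool × Int :=
  let bd := pvNest board
  bd.items.foldl
    (fun (st : Bool × Int) row =>
      row.2.items.foldl
        (fun (st : Bool × Int) cp =>
          let cell := cp.2
          match cell.keys with
          | [] => st        -- list(board[i][j].keys())[0] raises IndexError; excluded by Pre_
          | cur :: _ =>
            let cell := if number == cur then cell.insert number true else cell
            let marked := if number == cur then true else st.1
            if cell.getD cur false then (marked, st.2)
            else (marked, st.2 + (PySem.Int.ofStr? cur).getD 0))   -- int(cur); none excluded by Pre_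
        st)
    (false, 0)

-- ===== PORT B =====
-- the inner recursive helper 'go' of Source B; indices into the fixed cell list
def pvGo (number : String) (cells : List (PySem.Dict String Bool)) (lo hi : Nat) : Bool × Int :=
  if hi - lo ≤ 1 then
    -- leaf: one cell (Source B: `if hi - lo <= 1`)
    let cell := cells.getD lo (PySem.Dict.ofList [])   -- cells[lo]; in range on every reached call
    match cell.keys.head? with
    | some k =>
      if k == number then (true, 0)
      else (false, if cell.getD k false then 0 else (PySem.Int.ofStr? k).getD 0)   -- int(k); none excluded by Pre_
    | none => (false, 0)   -- next(iter(cell)) raises StopIteration; excluded by Pre_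
  else
    let mid := (lo + hi) / 2
    let r1 := pvGo number cells lo mid
    let r2 := pvGo number cells mid hi
    (r1.1 || r2.1, r1.2 + r2.2)
termination_by hi - lo
decreasing_by all_goals omega

def mark_number_in_board_alt (board : List (Int × List (Int × List (String × Bool)))) (number : String) : Bool × Int :=
  let cells : List (PySem.Dict String Bool) := (pvNest board).values.flatMap (fun row => row.values)
  if cells.isEmpty then (false, 0)
  else pvGo number cells 0 cells.length

-- ===== PRECONDITION & SPEC =====
-- Pre_ excludes exactly the inputs where Python A raises: a cell whose dict is empty
-- (IndexError on keys()[0]), or whose first key is not int-parsable while its cell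
-- stays unmarked (ValueError on int(current_number)).
def pvCellOk (number : String) (c : PySem.Dict String Bool) : Bool :=
  match c.keys.head? with
  | some k => number == k || c.getD k false || (PySem.Int.ofStr? k).isSome
  | none => false

def Pre_mark_number_in_board (board : List (Int × List (Int × List (String × Bool)))) (number : String) : Prop :=
  ((pvNest board).values.flatMap (fun row => row.values)).all (pvCellOk number) = true
instance (board : List (Int × List (Int × List (String × Bool)))) (number : String) : Decidable (Pre_mark_number_in_board board number) := by unfold Pre_mark_number_in_board; infer_instance

def pvWitness_mark_number_in_board : (List (Int × List (Int × List (String × Bool)))) × String :=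
  ([(0, [(0, [("7", false)]), (1, [("12", true)])]), (1, [(0, [("3", false)])])], "7")

def Spec_mark_number_in_board (board : List (Int × List (Int × List (String × Bool)))) (number : String) (out : Bool × Int) : Prop := out = mark_number_in_board_alt board number
instance (board : List (Int × List (Int × List (String × Bool)))) (number : String) (out : Bool × Int) : Decidable (Spec_mark_number_in_board board number out) := by unfold Spec_mark_number_in_board; infer_instance

-- ===== CLAIM (what is proved, stated in full; the proofs are below) =====
def Claim_equal_mark_number_in_board : Prop := ∀ (board : List (Int × List (Int × List (String × Bool)))) (number : String), Dom_mark_number_in_board board number → Pre_mark_number_in_board board number → Spec_mark_number_in_board board number (mark_number_in_board board number)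

-- ===== LEMMAS AND PROOFS =====

-- per-cell abstractions
def pvHit (number : String) (c : PySem.Dict String Bool) : Bool :=
  match c.keys.head? with
  | some k => number == k
  | none => false

def pvContrib (number : String) (c : PySem.Dict String Bool) : Int :=
  match c.keys.head? with
  | some k => if number == k then 0 else if c.getD k false then 0 else (PySem.Int.ofStr? k).getD 0
  | none => 0

def pvStepA (number : String) (st : Bool × Int) (cell : PySem.Dict String Bool) : Bool × Int :=
  match cell.keys with
  | [] => st
  | cur :: _ =>
    let cell := if number == cur then cell.insert number true else cell
    let marked := if number == cur then true else st.1
    if cell.getD cur false then (marked, st.2)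
    else (marked, st.2 + (PySem.Int.ofStr? cur).getD 0)

theorem pvStepA_eq (number : String) (st : Bool × Int) (c : PySem.Dict String Bool) :
    pvStepA number st c = (st.1 || pvHit number c, st.2 + pvContrib number c) := by
  unfold pvStepA pvHit pvContrib
  cases hk : c.keys with
  | nil => simp
  | cons cur t =>
    simp only [List.head?_cons]
    by_cases h : number = cur
    · subst h
      simp [PySem.Dict.getD_insert_self]
    · have hb : (number == cur) = false := by simpa using h
      simp only [hb, Bool.false_eq_true, if_false, Bool.or_false]
      by_cases hv : c.getD cur false = true
      · simp [hv]
      · simp only [Bool.not_eq_true] at hv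
        simp [hv]

theorem foldA_closed (number : String) (cells : List (PySem.Dict String Bool)) (st : Bool × Int) :
    cells.foldl (pvStepA number) st = (st.1 || cells.any (pvHit number), st.2 + (cells.map (pvContrib number)).sum) := by
  induction cells generalizing st with
  | nil => simp
  | cons c cs ih =>
    simp only [List.foldl_cons, List.any_cons, List.map_cons, List.sum_cons]
    rw [pvStepA_eq, ih]
    simp [Bool.or_assoc, add_assoc]

theorem foldl_foldl_flat (number : String) (rows : List (PySem.Dict Int (PySem.Dict String Bool))) (st : Bool × Int) :
    rows.foldl (fun st row => row.values.foldl (pvStepA number) st) st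
      = (rows.flatMap (fun row => row.values)).foldl (pvStepA number) st := by
  induction rows generalizing st with
  | nil => rfl
  | cons r rs ih => simp [List.foldl_append, ih]

-- the D&C helper computes (any hit, sum of contributions) over the slice cells[lo:hi]
theorem pvGo_closed (number : String) (cells : List (PySem.Dict String Bool)) :
    ∀ n lo hi, hi - lo = n → lo < hi → hi ≤ cells.length →
      pvGo number cells lo hi =
        (((cells.drop lo).take (hi - lo)).any (pvHit number),
         (((cells.drop lo).take (hi - lo)).map (pvContrib number)).sum) := by
  intro n
  induction n using Nat.strong_induction_on with
  | _ n ih =>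
    intro lo hi hn hlh hhl
    unfold pvGo
    by_cases hb : hi - lo ≤ 1
    · have hhi : hi = lo + 1 := by omega
      subst hhi
      have hlt : lo < cells.length := by omega
      have hslice : (cells.drop lo).take (lo + 1 - lo) = [cells[lo]] := by
        have : lo + 1 - lo = 1 := by omega
        rw [this]
        rw [List.take_one, List.head?_drop]
        simp [List.getElem?_eq_getElem hlt]
      simp only [hb, if_true, hslice]
      have hget : cells.getD lo (PySem.Dict.ofList []) = cells[lo] := by
        simp [List.getD, List.getElem?_eq_getElem hlt]
      rw [hget]
      cases hk : (cells[lo] : PySem.Dict String Bool).keys.head? with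
      | none => simp [pvHit, pvContrib, hk]
      | some k =>
        by_cases h : number = k
        · subst h
          simp [pvHit, pvContrib, hk]
        · have h1 : (k == number) = false := by
            simp only [beq_eq_false_iff_ne, ne_eq]; exact fun e => h e.symm
          simp [pvHit, pvContrib, hk, h, h1]
    · simp only [hb, if_false]
      have hmidlo : lo < (lo + hi) / 2 := by omega
      have hmidhi : (lo + hi) / 2 < hi := by omega
      rw [ih ((lo + hi) / 2 - lo) (by omega) lo ((lo + hi) / 2) rfl hmidlo (by omega),
          ih (hi - (lo + hi) / 2) (by omega) ((lo + hi) / 2) hi rfl hmidhi hhl]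
      have hsplit : (cells.drop lo).take (hi - lo)
          = (cells.drop lo).take ((lo + hi) / 2 - lo) ++ (cells.drop ((lo + hi) / 2)).take (hi - (lo + hi) / 2) := by
        have h1 : hi - lo = ((lo + hi) / 2 - lo) + (hi - (lo + hi) / 2) := by omega
        rw [h1, List.take_add, List.drop_drop]
        have h2 : lo + ((lo + hi) / 2 - lo) = (lo + hi) / 2 := by omega
        rw [h2]
      rw [hsplit]
      simp

-- ===== VERDICT (by name: the statement is the Claim_ definition above) =====
theorem mark_number_in_board_spec : Claim_equal_mark_number_in_board := by
  intro board number _ _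
  unfold Spec_mark_number_in_board mark_number_in_board mark_number_in_board_alt
  simp only []
  set cells := (pvNest board).values.flatMap (fun row => row.values) with hcells
  -- A's nested fold is the flat fold of pvStepA over cells
  have hA : (pvNest board).items.foldl
      (fun (st : Bool × Int) row =>
        row.2.items.foldl
          (fun (st : Bool × Int) cp =>
            match cp.2.keys with
            | [] => st
            | cur :: _ =>
              let cell := if number == cur then cp.2.insert number true else cp.2
              let marked := if number == cur then true else st.1
              if cell.getD cur false then (marked, st.2)
              else (marked, st.2 + (PySem.Int.ofStr? cur).getD 0))
          st)
      (false, 0) = cells.foldl (pvStepA number) (false, 0) := by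
    have hinner : ∀ (row : PySem.Dict Int (PySem.Dict String Bool)) (st : Bool × Int),
        row.items.foldl
          (fun (st : Bool × Int) cp =>
            match cp.2.keys with
            | [] => st
            | cur :: _ =>
              let cell := if number == cur then cp.2.insert number true else cp.2
              let marked := if number == cur then true else st.1
              if cell.getD cur false then (marked, st.2)
              else (marked, st.2 + (PySem.Int.ofStr? cur).getD 0))
          st = row.values.foldl (pvStepA number) st := by
      intro row st
      show _ = (row.items.map (·.2)).foldl (pvStepA number) st
      rw [List.foldl_map]
      rfl
    calc (pvNest board).items.foldl _ (false, 0)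
        = (pvNest board).items.foldl (fun st row => row.2.values.foldl (pvStepA number) st) (false, 0) := by
          exact List.foldl_ext _ _ _ (fun st row _ => hinner row.2 st)
      _ = ((pvNest board).items.map (·.2)).foldl (fun st row => row.values.foldl (pvStepA number) st) (false, 0) := by
          rw [List.foldl_map]
      _ = cells.foldl (pvStepA number) (false, 0) := by
          rw [foldl_foldl_flat]; rfl
  rw [hA, foldA_closed]
  by_cases hc : cells = []
  · simp [hc]
  · have hne : cells.isEmpty = false := by simp [hc]
    simp only [hne, Bool.false_eq_true, if_false]
    have hlen : 0 < cells.length := List.length_pos_iff.mpr hc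
    rw [pvGo_closed number cells cells.length 0 cells.length rfl hlen le_rfl]
    simp
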